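-- pv_equiv track=rewrite | github.com/rtmigo/vien_py | vien/_parsed_args.py | _iter_after
-- ===== SOURCE A (Python) =====
-- from typing import List, Optional, Iterable
--
-- def _iter_after(items: Iterable[str], x: str) -> Iterable[str]:
--     found = False
--     for arg in items:
--         if found:
--             yield arg
--         elif arg == x:
--             found = True
--     if not found:
--         raise LookupError
-- ===== SOURCE B (Python) =====
-- def _iter_after(items, x):
--     items = list(items)
--     try:
--         i = items.index(x)
--     except ValueError:
--         raise LookupError
--     yield from items[i + 1:]
-- ===== Notes on version B (the rewrite author's own statement) =====
-- stated objective: idiomatic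
-- what changed: Replaces A's flag-checked element-by-element loop by materializing the input, locating x with list.index, and yielding the tail slice items[i+1:]; no per-item branching remains.
import Mathlib
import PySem

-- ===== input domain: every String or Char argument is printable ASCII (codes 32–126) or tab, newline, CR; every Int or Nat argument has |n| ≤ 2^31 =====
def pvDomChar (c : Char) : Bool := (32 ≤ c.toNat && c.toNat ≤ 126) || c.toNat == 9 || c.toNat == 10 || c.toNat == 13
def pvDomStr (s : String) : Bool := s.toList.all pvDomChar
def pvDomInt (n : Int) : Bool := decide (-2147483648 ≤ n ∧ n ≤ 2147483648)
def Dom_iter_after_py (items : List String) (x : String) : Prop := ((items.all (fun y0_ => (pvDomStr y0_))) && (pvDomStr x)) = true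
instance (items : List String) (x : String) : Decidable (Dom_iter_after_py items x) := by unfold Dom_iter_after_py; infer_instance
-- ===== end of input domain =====

-- B replaces A's flag-checked loop by list.index + tail slice; A raises LookupError when x is absent, excluded by Pre_.
-- ===== PORT A =====
def iterAfterGoA (x : String) : List String → Bool → List String
  | [], _ => []
  | a :: t, found =>
    if found then a :: iterAfterGoA x t found
    else if a == x then iterAfterGoA x t true
    else iterAfterGoA x t false

def iter_after_py (items : List String) (x : String) : List String :=
  iterAfterGoA x items false

-- ===== PORT B =====
def iter_after_py_alt (items : List String) (x : String) : List String :=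
  match PySem.List.index? items x with
  | some i => PySem.List.slice items (some ((i : Int) + 1)) none
  | none => []   -- unreachable under Pre_ (B raises LookupError there, as A does)

-- ===== PRECONDITION & SPEC =====
-- Pre_ excludes inputs where x does not occur in items: there A raises LookupError.
def Pre_iter_after_py (items : List String) (x : String) : Prop := x ∈ items
instance (items : List String) (x : String) : Decidable (Pre_iter_after_py items x) := by unfold Pre_iter_after_py; infer_instance
def pvWitness_iter_after_py : List String × String := (["a", "b", "c"], "b")
def Spec_iter_after_py (items : List String) (x : String) (out : List String) : Prop := out = iter_after_py_alt items x
instance (items : List String) (x : String) (out : List String) : Decidable (Spec_iter_after_py items x out) := by unfold Spec_iter_after_py; infer_instance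

-- ===== CLAIM (what is proved, stated in full; the proofs are below) =====
def Claim_equal_iter_after_py : Prop := ∀ (items : List String) (x : String), Dom_iter_after_py items x → Pre_iter_after_py items x → Spec_iter_after_py items x (iter_after_py items x)

-- ===== LEMMAS AND PROOFS =====
theorem goA_true (x : String) (t : List String) : iterAfterGoA x t true = t := by
  induction t with
  | nil => rfl
  | cons a t ih => simp [iterAfterGoA, ih]

theorem goA_eq_drop (x : String) (items : List String) (i : Nat)
    (h : PySem.List.index? items x = some i) :
    iterAfterGoA x items false = items.drop (i + 1) := by
  induction items generalizing i with
  | nil => simp [PySem.List.index?] at h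
  | cons a t ih =>
    by_cases hax : a == x
    · have hx : a = x := by simpa using hax
      rw [hx, PySem.List.index?_cons_self] at h
      cases h
      simp [iterAfterGoA, hax, goA_true]
    · have hne : a ≠ x := by simpa using hax
      rw [PySem.List.index?_cons_of_ne _ hne] at h
      cases hj : PySem.List.index? t x with
      | none => rw [hj] at h; simp at h
      | some j =>
        rw [hj] at h
        simp at h
        subst h
        simp [iterAfterGoA, hax, ih j hj]

-- ===== VERDICT (by name: the statement is the Claim_ definition above) =====
theorem iter_after_py_spec : Claim_equal_iter_after_py := by
  intro items x _ hpre
  unfold Spec_iter_after_py iter_after_py iter_after_py_alt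
  cases hi : PySem.List.index? items x with
  | none =>
    exact absurd hpre (by rwa [PySem.List.index?_eq_none_iff] at hi)
  | some i =>
    simp only [goA_eq_drop x items i hi]
    rw [show ((i : Int) + 1) = ((i + 1 : Nat) : Int) by push_cast; ring,
        PySem.List.slice_from_natCast]
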